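-- pv_equiv track=rewrite | github.com/NeDimaN/Python123 | hw_16_1.py | change_Char
-- ===== SOURCE A (Python) =====
-- def change_Char(s, c_old, c_new):
--     s2 = ''
--     i = 0
--     while i < len(s):
--         if (s[i] == c_old) and (i % 2 == 0):
--             s2 = s2 + c_new
--         else:
--             s2 = s2 + s[i]
--         i += 1
--
--     return s2
-- ===== SOURCE B (Python) =====
-- def change_Char(s, c_old, c_new):
--     lst = list(s)
--     for i in range(0, len(lst), 2):
--         if lst[i] == c_old:
--             lst[i] = c_new
--     return ''.join(lst)
-- ===== Notes on version B (the rewrite author's own statement) =====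
-- stated objective: faster
-- what changed: B converts the string to a mutable list once, updates only the even positions in place (range step 2) and joins once, instead of A's per-character parity test with repeated string concatenation into an accumulator; this removes the quadratic-concatenation cost.
import Mathlib
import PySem

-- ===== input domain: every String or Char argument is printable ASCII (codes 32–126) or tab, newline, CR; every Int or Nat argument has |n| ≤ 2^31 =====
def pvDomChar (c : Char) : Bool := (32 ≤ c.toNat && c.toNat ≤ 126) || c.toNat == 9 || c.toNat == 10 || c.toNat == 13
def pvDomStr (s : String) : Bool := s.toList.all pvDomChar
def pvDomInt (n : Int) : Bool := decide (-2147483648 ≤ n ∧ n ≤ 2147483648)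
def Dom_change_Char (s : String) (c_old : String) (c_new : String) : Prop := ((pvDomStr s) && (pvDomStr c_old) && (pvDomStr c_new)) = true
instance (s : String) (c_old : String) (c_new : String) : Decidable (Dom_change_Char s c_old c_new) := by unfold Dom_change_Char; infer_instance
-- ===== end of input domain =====

-- B replaces the per-character parity test and repeated string concatenation of A
-- by mutating a char list only at even indices and joining once (a different decomposition).


-- ===== PORT A =====
-- while i < len(s): s2 += c_new if s[i]==c_old and i%2==0 else s[i]
-- (over List Char with String.mk at the end; s[i] is the 1-char string [c])
def changeA_go (c_old c_new : List Char) : List Char → Nat → List Char → List Char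
  | [], _, s2 => s2
  | c :: rest, i, s2 =>
      changeA_go c_old c_new rest (i + 1)
        (if [c] == c_old && i % 2 == 0 then s2 ++ c_new else s2 ++ [c])

def change_Char (s : String) (c_old : String) (c_new : String) : String :=
  String.ofList (changeA_go c_old.toList c_new.toList s.toList 0 [])

-- ===== PORT B =====
-- for i in range(0, len(lst), 2): if lst[i] == c_old: lst[i] = c_new   (the for over
-- range(0,n,2) transcribed as the index loop i → i+2; the index is always in range)
def changeB_go (c_old c_new : List Char) (lst : List (List Char)) (i : Nat) : List (List Char) :=
  if h : i < lst.length then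
    changeB_go c_old c_new (if lst[i] == c_old then lst.set i c_new else lst) (i + 2)
  else lst
termination_by lst.length - i
decreasing_by
  split
  · simp only [List.length_set]; omega
  · omega

-- lst = list(s); ''.join ported as PySem.Chars.join with empty separator
def change_Char_alt (s : String) (c_old : String) (c_new : String) : String :=
  String.ofList (PySem.Chars.join []
    (changeB_go c_old.toList c_new.toList (s.toList.map (fun c => [c])) 0))

-- ===== PRECONDITION & SPEC =====
def Spec_change_Char (s : String) (c_old : String) (c_new : String) (out : String) : Prop := out = change_Char_alt s c_old c_new
instance (s : String) (c_old : String) (c_new : String) (out : String) : Decidable (Spec_change_Char s c_old c_new out) := by unfold Spec_change_Char; infer_instance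

-- ===== CLAIM (what is proved, stated in full; the proofs are below) =====
def Claim_equal_change_Char : Prop := ∀ (s : String) (c_old : String) (c_new : String), Dom_change_Char s c_old c_new → Spec_change_Char s c_old c_new (change_Char s c_old c_new)

-- ===== LEMMAS AND PROOFS =====

theorem join_nil_flatten (l : List (List Char)) : PySem.Chars.join [] l = l.flatten := by
  simp only [PySem.Chars.join, List.intercalate]
  induction l with
  | nil => rfl
  | cons a t ih =>
    cases t with
    | nil => simp
    | cons b t' => simp_all [List.intersperse]

-- the list of output pieces, one per input character
def pvPieces (c_old c_new : List Char) : List Char → Nat → List (List Char)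
  | [], _ => []
  | c :: rest, i =>
      (if [c] == c_old && i % 2 == 0 then c_new else [c]) :: pvPieces c_old c_new rest (i + 1)

theorem changeA_go_eq (c_old c_new : List Char) :
    ∀ (cs : List Char) (i : Nat) (s2 : List Char),
      changeA_go c_old c_new cs i s2 = s2 ++ (pvPieces c_old c_new cs i).flatten := by
  intro cs
  induction cs with
  | nil => intro i s2; simp [changeA_go, pvPieces]
  | cons c rest ih =>
    intro i s2
    simp only [changeA_go, pvPieces, ih, List.flatten_cons, ← List.append_assoc]
    split <;> rfl

theorem pvPieces_getElem? (c_old c_new : List Char) :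
    ∀ (cs : List Char) (i j : Nat),
      (pvPieces c_old c_new cs i)[j]? =
        (cs[j]?).map (fun c => if [c] == c_old && (i + j) % 2 == 0 then c_new else [c]) := by
  intro cs
  induction cs with
  | nil => intro i j; simp [pvPieces]
  | cons c rest ih =>
    intro i j
    cases j with
    | zero => simp [pvPieces]
    | succ j' =>
      simp only [pvPieces, List.getElem?_cons_succ, ih]
      have : i + 1 + j' = i + (j' + 1) := by omega
      rw [this]

theorem changeB_go_getElem? (c_old c_new : List Char) (lst : List (List Char)) (i : Nat) :
    ∀ j : Nat, (changeB_go c_old c_new lst i)[j]? =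
      if i ≤ j ∧ (j - i) % 2 = 0 then
        (lst[j]?).map (fun p => if p == c_old then c_new else p)
      else lst[j]? := by
  fun_induction changeB_go c_old c_new lst i with
  | case1 lst i h ih =>
    intro j
    simp only [dite_eq_ite] at ih
    rw [ih j]
    by_cases hji : j = i
    · subst hji
      have hnot : ¬ (j + 2 ≤ j ∧ (j - (j + 2)) % 2 = 0) := by omega
      have hyes : j ≤ j ∧ (j - j) % 2 = 0 := by omega
      rw [if_neg hnot, if_pos hyes]
      split
      · next hc =>
        rw [List.getElem?_set_self (by omega), List.getElem?_eq_getElem h]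
        simp only [beq_iff_eq] at hc
        simp [hc]
      · next hc =>
        rw [List.getElem?_eq_getElem h]
        simp only [beq_iff_eq] at hc
        simp [hc]
    · have hsame : (if lst[i] == c_old then lst.set i c_new else lst)[j]? = lst[j]? := by
        split
        · exact List.getElem?_set_ne (by omega)
        · rfl
      rw [hsame]
      by_cases hcond : i ≤ j ∧ (j - i) % 2 = 0
      · have : i + 2 ≤ j ∧ (j - (i + 2)) % 2 = 0 := by omega
        rw [if_pos this, if_pos hcond]
      · have : ¬ (i + 2 ≤ j ∧ (j - (i + 2)) % 2 = 0) := by omega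
        rw [if_neg this, if_neg hcond]
  | case2 lst i h =>
    intro j
    have : ¬ (i ≤ j ∧ (j - i) % 2 = 0) ∨ lst[j]? = none := by
      by_cases hj : j < lst.length
      · left; omega
      · right; exact List.getElem?_eq_none (by omega)
    rcases this with h' | h'
    · rw [if_neg h']
    · rw [h']; split <;> simp

theorem changeB_eq_pieces (c_old c_new : List Char) (cs : List Char) :
    changeB_go c_old c_new (cs.map (fun c => [c])) 0 = pvPieces c_old c_new cs 0 := by
  apply List.ext_getElem?
  intro j
  rw [changeB_go_getElem?, pvPieces_getElem?]
  by_cases hj : (j : Nat) % 2 = 0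
  · rw [if_pos (by omega)]
    simp only [List.getElem?_map, Option.map_map]
    cases cs[j]? with
    | none => rfl
    | some c =>
      by_cases hc : [c] = c_old <;> simp [hc, hj]
  · rw [if_neg (by omega)]
    simp only [List.getElem?_map]
    cases cs[j]? with
    | none => rfl
    | some c =>
      by_cases hc : [c] = c_old <;> simp [hc, hj]

-- ===== VERDICT (by name: the statement is the Claim_ definition above) =====
theorem change_Char_spec : Claim_equal_change_Char := by
  intro s c_old c_new _
  show change_Char s c_old c_new = change_Char_alt s c_old c_new
  unfold change_Char change_Char_alt
  rw [changeA_go_eq, join_nil_flatten, changeB_eq_pieces]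
  rfl
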